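-- pv_equiv track=rewrite | github.com/skrinsky/ai-music-full-pipeline | training/generate_v2.py | infer_phase_from_tokens
-- ===== SOURCE A (Python) =====
-- def infer_phase_from_tokens(tokens: list[int], layout: dict, type_names: list[str]) -> tuple[str, int | None]:
--     """Walk a token sequence and return the grammar phase + last_inst
--     that the generation loop should resume from."""
--     # Build reverse lookup: global_id → type_name
--     id_to_type: dict[int, str] = {}
--     for tname in type_names:
--         spec = layout.get(tname)
--         if spec is None:
--             continue
--         for local in range(spec["size"]):
--             id_to_type[spec["start"] + local] = tname
--
--     phase = "TIME"
--     last_inst = None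
--     inst_start = layout.get("INST", {}).get("start", 0)
--
--     for tok in tokens:
--         tname = id_to_type.get(tok)
--         if tname is None:
--             continue
--         if tname == "TIME_SHIFT":
--             phase = "POST_TS"
--         elif tname == "BAR":
--             phase = "INST"
--         elif tname == "INST":
--             last_inst = tok - inst_start
--             phase = "VEL"
--         elif tname == "VEL":
--             phase = "PITCH"
--         elif tname.startswith("PITCH"):
--             phase = "DUR"
--         elif tname == "DUR":
--             phase = "TIME"
--
--     return phase, last_inst
-- ===== SOURCE B (Python) =====
-- def infer_phase_from_tokens(tokens: list[int], layout: dict, type_names: list[str]) -> tuple[str, int | None]: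
--     """Walk a token sequence and return the grammar phase + last_inst
--     that the generation loop should resume from.
--
--     Instead of materialising the whole global-id -> type_name table,
--     keep one (name, lo, hi) interval per type and resolve each token by
--     scanning the intervals in reverse declaration order (last declared
--     type wins on overlap, exactly like dict overwrites in A)."""
--     intervals: list[tuple[str, int, int]] = []
--     for tname in type_names:
--         spec = layout.get(tname)
--         if spec is None:
--             continue
--         size = spec["size"]
--         if size > 0:
--             lo = spec["start"]
--             intervals.append((tname, lo, lo + size))
--     intervals.reverse()
--
--     inst_start = layout.get("INST", {}).get("start", 0)
--     trans = {"TIME_SHIFT": "POST_TS", "BAR": "INST", "VEL": "PITCH", "DUR": "TIME"}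
--
--     phase = "TIME"
--     last_inst = None
--     for tok in tokens:
--         tname = next((t for t, lo, hi in intervals if lo <= tok < hi), None)
--         if tname is None:
--             continue
--         if tname == "INST":
--             last_inst = tok - inst_start
--             phase = "VEL"
--         elif tname.startswith("PITCH"):
--             phase = "DUR"
--         elif tname in trans:
--             phase = trans[tname]
--     return phase, last_inst
-- ===== Notes on version B (the rewrite author's own statement) =====
-- stated objective: faster
-- what changed: B keeps one (name, lo, hi) interval per type and resolves each token by a reverse interval scan plus a transition table, instead of materialising a dict entry for every id in every type's range.
-- outside the precondition, e.g. on infer_phase_from_tokens([0], {'BAR': {'start': 0}}, ['BAR']): A raises KeyError, B raises KeyError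
import Mathlib
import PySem

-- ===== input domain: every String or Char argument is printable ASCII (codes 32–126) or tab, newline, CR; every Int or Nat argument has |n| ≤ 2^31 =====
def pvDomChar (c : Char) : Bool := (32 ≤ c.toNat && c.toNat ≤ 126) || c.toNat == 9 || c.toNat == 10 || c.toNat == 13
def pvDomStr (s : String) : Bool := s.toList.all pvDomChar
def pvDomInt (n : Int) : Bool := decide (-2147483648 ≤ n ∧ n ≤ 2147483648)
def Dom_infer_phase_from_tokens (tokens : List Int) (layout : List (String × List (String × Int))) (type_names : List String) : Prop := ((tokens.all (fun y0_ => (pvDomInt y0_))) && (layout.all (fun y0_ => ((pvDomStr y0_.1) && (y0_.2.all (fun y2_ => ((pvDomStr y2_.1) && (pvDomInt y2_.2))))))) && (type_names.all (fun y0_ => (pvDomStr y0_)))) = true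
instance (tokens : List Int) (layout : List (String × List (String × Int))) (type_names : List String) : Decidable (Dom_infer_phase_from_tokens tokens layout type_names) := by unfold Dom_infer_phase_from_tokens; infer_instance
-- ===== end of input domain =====

-- B replaces A's materialisation of the whole global-id → type_name dict by one
-- (name, lo, hi) interval per type, resolved per token by a reverse scan (last
-- declared type wins on overlap, like A's dict overwrites); equivalence of the
-- RETURN value is proved on Pre_ (the inputs where the Python A does not raise).

-- ===== PORT A =====
-- the inner `for local in range(spec["size"])` loop of A (spec["start"] read as getD 0;
-- a missing "start" with size > 0 is outside Pre_)
def pvAInsertType (layout : List (String × List (String × Int))) (d : PySem.Dict Int String) (tname : String) : PySem.Dict Int String :=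
  match layout.lookup tname with
  | none => d
  | some spec =>
    match spec.lookup "size" with
    | none => d  -- Python raises KeyError here; outside Pre_
    | some sz =>
      (PySem.List.pyRange 0 sz 1).foldl (fun d loc => d.insert ((spec.lookup "start").getD 0 + loc) tname) d

def pvInstStart (layout : List (String × List (String × Int))) : Int :=
  match layout.lookup "INST" with
  | none => 0
  | some spec => (spec.lookup "start").getD 0

def infer_phase_from_tokens (tokens : List Int) (layout : List (String × List (String × Int))) (type_names : List String) : String × Option Int :=
  let id_to_type : PySem.Dict Int String := type_names.foldl (pvAInsertType layout) PySem.Dict.empty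
  let inst_start := pvInstStart layout
  tokens.foldl (fun st tok =>
    match id_to_type.get? tok with
    | none => st
    | some tname =>
      if tname = "TIME_SHIFT" then ("POST_TS", st.2)
      else if tname = "BAR" then ("INST", st.2)
      else if tname = "INST" then ("VEL", some (tok - inst_start))
      else if tname = "VEL" then ("PITCH", st.2)
      else if PySem.Str.startswith tname "PITCH" then ("DUR", st.2)
      else if tname = "DUR" then ("TIME", st.2)
      else st) ("TIME", none)

-- ===== PORT B =====
def pvBIntervals (layout : List (String × List (String × Int))) (type_names : List String) : List (String × Int × Int) :=
  type_names.foldl (fun acc tname =>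
    match layout.lookup tname with
    | none => acc
    | some spec =>
      match spec.lookup "size" with
      | none => acc  -- Python raises KeyError here; outside Pre_
      | some sz =>
        if 0 < sz then acc ++ [(tname, (spec.lookup "start").getD 0, (spec.lookup "start").getD 0 + sz)]
        else acc) []

-- next((t for t, lo, hi in intervals if lo <= tok < hi), None)
def pvBFind : List (String × Int × Int) → Int → Option String
  | [], _ => none
  | (t, lo, hi) :: rest, tok => if lo ≤ tok ∧ tok < hi then some t else pvBFind rest tok

def pvTrans : PySem.Dict String String :=
  PySem.Dict.ofList [("TIME_SHIFT", "POST_TS"), ("BAR", "INST"), ("VEL", "PITCH"), ("DUR", "TIME")]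

def pvInstStartB (layout : List (String × List (String × Int))) : Int :=
  match layout.lookup "INST" with
  | none => 0
  | some spec => (spec.lookup "start").getD 0

def infer_phase_from_tokens_alt (tokens : List Int) (layout : List (String × List (String × Int))) (type_names : List String) : String × Option Int :=
  let intervals := (pvBIntervals layout type_names).reverse
  let inst_start := pvInstStartB layout
  tokens.foldl (fun st tok =>
    match pvBFind intervals tok with
    | none => st
    | some tname =>
      if tname = "INST" then ("VEL", some (tok - inst_start))
      else if PySem.Str.startswith tname "PITCH" then ("DUR", st.2)
      else match pvTrans.get? tname with
        | some p => (p, st.2)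
        | none => st) ("TIME", none)

-- ===== PRECONDITION & SPEC =====
-- Pre_ excludes exactly the inputs on which the Python A raises KeyError: some
-- name in type_names has a layout entry lacking "size", or lacking "start" with
-- a positive "size".
def Pre_infer_phase_from_tokens (tokens : List Int) (layout : List (String × List (String × Int))) (type_names : List String) : Prop :=
  (type_names.all (fun t =>
    match layout.lookup t with
    | none => true
    | some spec =>
      match spec.lookup "size" with
      | none => false
      | some sz => decide (sz ≤ 0) || (spec.lookup "start").isSome)) = true

instance (tokens : List Int) (layout : List (String × List (String × Int))) (type_names : List String) : Decidable (Pre_infer_phase_from_tokens tokens layout type_names) := by unfold Pre_infer_phase_from_tokens; infer_instance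

def pvWitness_infer_phase_from_tokens : List Int × (List (String × List (String × Int))) × List String :=
  ([5, 0, 1], [("INST", [("start", 4), ("size", 3)]), ("TIME_SHIFT", [("start", 0), ("size", 2)])], ["INST", "TIME_SHIFT"])

def Spec_infer_phase_from_tokens (tokens : List Int) (layout : List (String × List (String × Int))) (type_names : List String) (out : String × Option Int) : Prop := out = infer_phase_from_tokens_alt tokens layout type_names
instance (tokens : List Int) (layout : List (String × List (String × Int))) (type_names : List String) (out : String × Option Int) : Decidable (Spec_infer_phase_from_tokens tokens layout type_names out) := by unfold Spec_infer_phase_from_tokens; infer_instance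

-- ===== CLAIM (what is proved, stated in full; the proofs are below) =====
def Claim_equal_infer_phase_from_tokens : Prop := ∀ (tokens : List Int) (layout : List (String × List (String × Int))) (type_names : List String), Dom_infer_phase_from_tokens tokens layout type_names → Pre_infer_phase_from_tokens tokens layout type_names → Spec_infer_phase_from_tokens tokens layout type_names (infer_phase_from_tokens tokens layout type_names)

-- ===== LEMMAS AND PROOFS =====

-- one interval per type name: what a single loop body of B's interval builder contributes
def pvIv (layout : List (String × List (String × Int))) (tname : String) : List (String × Int × Int) :=
  match layout.lookup tname with
  | none => []
  | some spec =>
    match spec.lookup "size" with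
    | none => []
    | some sz =>
      if 0 < sz then [(tname, (spec.lookup "start").getD 0, (spec.lookup "start").getD 0 + sz)]
      else []

lemma pvBFind_append (xs ys : List (String × Int × Int)) (tok : Int) :
    pvBFind (xs ++ ys) tok = match pvBFind xs tok with
      | some t => some t
      | none => pvBFind ys tok := by
  induction xs with
  | nil => simp [pvBFind]
  | cons p rest ih =>
    obtain ⟨t, lo, hi⟩ := p
    simp only [List.cons_append, pvBFind]
    split_ifs with h <;> simp [ih]

lemma pvRange_insert_get (sz st : Int) (tn : String) (d : PySem.Dict Int String) (tok : Int) :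
    ((PySem.List.pyRange 0 sz 1).foldl (fun d loc => d.insert (st + loc) tn) d).get? tok
      = if st ≤ tok ∧ tok < st + sz then some tn else d.get? tok := by
  rw [PySem.List.pyRange_one]
  simp only [Int.sub_zero]
  have : ∀ (n : Nat) (d : PySem.Dict Int String),
      (((List.range n).map (fun k : Nat => (0 : Int) + (k : Int))).foldl (fun d loc => d.insert (st + loc) tn) d).get? tok
        = if st ≤ tok ∧ tok < st + n then some tn else d.get? tok := by
    intro n
    induction n with
    | zero =>
      intro d
      simp only [List.range_zero, List.map_nil, List.foldl_nil]
      rw [if_neg (by push_cast; omega)]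
    | succ m ih =>
      intro d
      rw [List.range_succ]
      simp only [List.map_append, List.foldl_append, List.map_cons, List.map_nil, List.foldl_cons,
        List.foldl_nil]
      rw [PySem.Dict.get?_insert]
      by_cases hk : tok = st + (0 + (m : Int))
      · rw [if_pos hk]
        rw [if_pos (by push_cast at hk ⊢; omega)]
      · rw [if_neg hk, ih]
        by_cases h1 : st ≤ tok ∧ tok < st + (m : Int)
        · rw [if_pos h1, if_pos (by push_cast; omega)]
        · rw [if_neg h1, if_neg (by push_cast at hk h1 ⊢; omega)]
  by_cases h : sz ≤ 0
  · have hz : sz.toNat = 0 := by omega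
    rw [this sz.toNat d, hz]
    simp only [Nat.cast_zero]
    have : ¬ (st ≤ tok ∧ tok < st + sz) := by omega
    have h0 : ¬ (st ≤ tok ∧ tok < st + (0:Int)) := by omega
    rw [if_neg h0, if_neg this]
  · have hc : ((sz.toNat : Int)) = sz := by omega
    rw [this sz.toNat d, hc]

lemma pvStep_get (layout : List (String × List (String × Int))) (tname : String)
    (d : PySem.Dict Int String) (tok : Int) :
    (pvAInsertType layout d tname).get? tok
      = match pvBFind (pvIv layout tname) tok with
        | some t => some t
        | none => d.get? tok := by
  cases hl : layout.lookup tname with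
  | none => simp [pvAInsertType, pvIv, hl, pvBFind]
  | some spec =>
    cases hs : spec.lookup "size" with
    | none => simp [pvAInsertType, pvIv, hl, hs, pvBFind]
    | some sz =>
      simp only [pvAInsertType, pvIv, hl, hs]
      rw [pvRange_insert_get]
      by_cases hp : 0 < sz
      · rw [if_pos hp]
        simp only [pvBFind]
        split_ifs with hin <;> simp
      · rw [if_neg hp, if_neg (by omega)]
        simp [pvBFind]

lemma pvIv_reverse (layout : List (String × List (String × Int))) (t : String) :
    (pvIv layout t).reverse = pvIv layout t := by
  unfold pvIv
  split
  · rfl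
  · split
    · rfl
    · split <;> rfl

lemma pvBIntervals_eq (layout : List (String × List (String × Int))) (type_names : List String) :
    pvBIntervals layout type_names = type_names.flatMap (pvIv layout) := by
  unfold pvBIntervals
  have hstep : (fun (acc : List (String × Int × Int)) (tname : String) =>
      match layout.lookup tname with
      | none => acc
      | some spec =>
        match spec.lookup "size" with
        | none => acc
        | some sz =>
          if 0 < sz then acc ++ [(tname, (spec.lookup "start").getD 0, (spec.lookup "start").getD 0 + sz)]
          else acc)
      = fun acc tname => acc ++ pvIv layout tname := by
    funext acc tname
    cases hl : List.lookup tname layout with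
    | none => simp [pvIv, hl]
    | some spec =>
      cases hs : List.lookup "size" spec with
      | none => simp [pvIv, hl, hs]
      | some sz => by_cases h : 0 < sz <;> simp [pvIv, hl, hs, h]
  rw [hstep, PySem.List.foldl_append_eq_flatMap]
  simp

lemma pvBuild_get (layout : List (String × List (String × Int))) (type_names : List String) (tok : Int) :
    ∀ d : PySem.Dict Int String,
    (type_names.foldl (pvAInsertType layout) d).get? tok
      = match pvBFind (type_names.flatMap (pvIv layout)).reverse tok with
        | some t => some t
        | none => d.get? tok := by
  induction type_names with
  | nil => intro d; simp [pvBFind]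
  | cons t rest ih =>
    intro d
    simp only [List.foldl_cons, ih, List.flatMap_cons, List.reverse_append]
    rw [pvBFind_append, pvStep_get, pvIv_reverse]
    cases pvBFind (rest.flatMap (pvIv layout)).reverse tok <;> simp

-- the two per-token branch chains agree
lemma pvTrans_mk : pvTrans = PySem.Dict.mk
    [("TIME_SHIFT", "POST_TS"), ("BAR", "INST"), ("VEL", "PITCH"), ("DUR", "TIME")] := by decide

lemma pvTrans_get_none (tname : String) (h1 : tname ≠ "TIME_SHIFT") (h2 : tname ≠ "BAR")
    (h4 : tname ≠ "VEL") (h6 : tname ≠ "DUR") : pvTrans.get? tname = none := by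
  have e1 : (("TIME_SHIFT" : String) == tname) = false := beq_eq_false_iff_ne.mpr (Ne.symm h1)
  have e2 : (("BAR" : String) == tname) = false := beq_eq_false_iff_ne.mpr (Ne.symm h2)
  have e4 : (("VEL" : String) == tname) = false := beq_eq_false_iff_ne.mpr (Ne.symm h4)
  have e6 : (("DUR" : String) == tname) = false := beq_eq_false_iff_ne.mpr (Ne.symm h6)
  rw [pvTrans_mk]
  simp [e1, e2, e4, e6, PySem.Dict.get?]

lemma pvBranch_eq (tname : String) (st : String × Option Int) (tok inst_start : Int) :
    (if tname = "TIME_SHIFT" then ("POST_TS", st.2)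
      else if tname = "BAR" then ("INST", st.2)
      else if tname = "INST" then (("VEL" : String), some (tok - inst_start))
      else if tname = "VEL" then ("PITCH", st.2)
      else if PySem.Str.startswith tname "PITCH" then ("DUR", st.2)
      else if tname = "DUR" then ("TIME", st.2)
      else st)
    = (if tname = "INST" then (("VEL" : String), some (tok - inst_start))
      else if PySem.Str.startswith tname "PITCH" then ("DUR", st.2)
      else match pvTrans.get? tname with
        | some p => (p, st.2)
        | none => st) := by
  by_cases h1 : tname = "TIME_SHIFT"
  · subst h1
    rw [pvTrans_mk]
    simp only [PySem.Dict.get?_mk_cons]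
    simp
    try decide
  by_cases h2 : tname = "BAR"
  · subst h2
    rw [pvTrans_mk]
    simp only [PySem.Dict.get?_mk_cons]
    simp
    try decide
  by_cases h3 : tname = "INST"
  · subst h3; simp
  by_cases h4 : tname = "VEL"
  · subst h4
    rw [pvTrans_mk]
    simp only [PySem.Dict.get?_mk_cons]
    simp
    try decide
  by_cases h5 : PySem.Str.startswith tname "PITCH"
  · have h5c : PySem.Chars.startswith tname.toList ['P', 'I', 'T', 'C', 'H'] = true := by
      simpa using h5
    simp [h1, h2, h3, h4, h5c]
  have h5c : PySem.Chars.startswith tname.toList ['P', 'I', 'T', 'C', 'H'] = false := by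
    simpa using eq_false_of_ne_true h5
  by_cases h6 : tname = "DUR"
  · subst h6
    rw [pvTrans_mk]
    simp only [PySem.Dict.get?_mk_cons]
    simp
    try decide
  · rw [if_neg h1, if_neg h2, if_neg h3, if_neg h4,
      if_neg (by simp [h5c]), if_neg h6, if_neg h3, if_neg (by simp [h5c]),
      pvTrans_get_none tname h1 h2 h4 h6]

-- ===== VERDICT (by name: the statement is the Claim_ definition above) =====
theorem infer_phase_from_tokens_spec : Claim_equal_infer_phase_from_tokens := by
  intro tokens layout type_names _ _
  unfold Spec_infer_phase_from_tokens infer_phase_from_tokens infer_phase_from_tokens_alt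
  simp only
  congr 1
  funext st tok
  rw [pvBuild_get layout type_names tok PySem.Dict.empty, pvBIntervals_eq]
  simp only [PySem.Dict.get?_empty]
  cases pvBFind ((type_names.flatMap (pvIv layout)).reverse) tok with
  | none => rfl
  | some tname => exact pvBranch_eq tname st tok (pvInstStart layout)
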